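-- pv_equiv track=rewrite | github.com/amalija-ramljak/advent-of-code-2018 | aoc/day20 - the third trial/20.py | count_loop_length
-- ===== SOURCE A (Python) =====
-- def count_loop_length(line):
--     pairs = {
--         'N': 'S',
--         'S': 'N',
--         'E': 'W',
--         'W': 'E'
--     }
--     location = []  # stack
--     for el in line:
--         if len(location) == 0:
--             location.append(el)
--             continue
--         if el != pairs[location[-1]]:
--             location.append(el)
--         else:
--             location.pop()
--     return len(location)
-- ===== SOURCE B (Python) =====
-- def count_loop_length(line):
--     opp = {'N': 'S', 'S': 'N', 'E': 'W', 'W': 'E'}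
--     s = list(line)
--     while True:
--         out = []
--         i = 0
--         n = len(s)
--         while i < n:
--             if i + 1 < n and opp.get(s[i]) == s[i + 1]:
--                 i += 2
--             else:
--                 out.append(s[i])
--                 i += 1
--         if len(out) == len(s):
--             return len(s)
--         s = out
-- ===== Notes on version B (the rewrite author's own statement) =====
-- stated objective: alternative
-- what changed: Replaces A's single left-to-right stack pass (push/pop against a pairs dict) by repeated whole-string scan passes that delete adjacent opposite pairs and re-run until a pass removes nothing; the state is just the shrinking character list, and confluence of inverse-pair cancellation gives the same reduced length.
import Mathlib
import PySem

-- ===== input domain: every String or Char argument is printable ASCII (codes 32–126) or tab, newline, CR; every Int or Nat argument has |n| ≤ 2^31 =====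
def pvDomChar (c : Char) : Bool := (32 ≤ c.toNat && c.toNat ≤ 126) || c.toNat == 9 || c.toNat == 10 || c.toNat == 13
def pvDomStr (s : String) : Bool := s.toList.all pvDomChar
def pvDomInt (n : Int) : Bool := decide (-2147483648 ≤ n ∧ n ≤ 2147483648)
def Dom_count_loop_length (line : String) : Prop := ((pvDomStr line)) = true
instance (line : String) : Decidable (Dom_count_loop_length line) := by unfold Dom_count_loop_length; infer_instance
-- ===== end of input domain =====

-- B replaces A's single left-to-right stack pass by repeated whole-list scans that delete
-- adjacent opposite pairs until a pass removes nothing (objective: alternative decomposition).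

-- ===== PORT A =====
-- the dict 'pairs'
def pairsD : PySem.Dict Char Char :=
  (((PySem.Dict.empty.insert 'N' 'S').insert 'S' 'N').insert 'E' 'W').insert 'W' 'E'

-- one iteration of A's for-loop (stack 'location', Python append/pop at the rear);
-- pairs[location[-1]] is a raising dict access: exact within Pre_, where the stack top
-- is always one of NSEW (the '!' default is never read there)
def stepA (loc : List Char) (el : Char) : List Char :=
  if loc.length = 0 then loc ++ [el]
  else if el ≠ (pairsD.get? ((PySem.List.pyGet? loc (-1)).getD '!')).getD '!' then loc ++ [el]
  else loc.dropLast

def count_loop_length (line : String) : Int :=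
  ((line.toList.foldl stepA []).length : Int)

-- ===== PORT B =====
-- B's inner while: one left-to-right pass, skipping each adjacent pair with
-- opp.get(s[i]) == s[i+1] (None for a non-NSEW char never equals a char)
def scanB : List Char → List Char
  | [] => []
  | [a] => [a]
  | a :: b :: rest =>
      if pairsD.get? a == some b then scanB rest
      else a :: scanB (b :: rest)

theorem scanB_length_le (s : List Char) : (scanB s).length ≤ s.length := by
  fun_induction scanB s <;> simp_all
  omega

-- B's outer while: repeat the pass until it removes nothing
def reduceB (s : List Char) : List Char :=
  if (scanB s).length = s.length then s else reduceB (scanB s)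
termination_by s.length
decreasing_by
  have := scanB_length_le s
  omega

def count_loop_length_alt (line : String) : Int :=
  ((reduceB line.toList).length : Int)

-- ===== PRECONDITION & SPEC =====
def nsew (c : Char) : Bool := c == 'N' || c == 'S' || c == 'E' || c == 'W'

-- exactly the inputs on which A returns: a non-NSEW character anywhere before the last
-- position reaches the stack top and the next iteration's pairs[...] raises KeyError
def Pre_count_loop_length (line : String) : Prop :=
  line.toList.dropLast.all nsew = true
instance (line : String) : Decidable (Pre_count_loop_length line) := by
  unfold Pre_count_loop_length; infer_instance

def pvWitness_count_loop_length : String := "NESSWN"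

def Spec_count_loop_length (line : String) (out : Int) : Prop := out = count_loop_length_alt line
instance (line : String) (out : Int) : Decidable (Spec_count_loop_length line out) := by unfold Spec_count_loop_length; infer_instance

-- ===== CLAIM (what is proved, stated in full; the proofs are below) =====
def Claim_equal_count_loop_length : Prop := ∀ (line : String), Dom_count_loop_length line → Pre_count_loop_length line → Spec_count_loop_length line (count_loop_length line)

-- ===== LEMMAS AND PROOFS =====

-- front-of-list version of A's stack, used only in the proofs
def sstep (st : List Char) (a : Char) : List Char :=
  match st with
  | [] => [a]
  | t :: r => if pairsD.get? t == some a then r else a :: t :: r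

theorem pairs_get (t : Char) :
    pairsD.get? t =
      if t = 'N' then some 'S' else if t = 'S' then some 'N'
      else if t = 'E' then some 'W' else if t = 'W' then some 'E' else none := by
  simp [pairsD, PySem.Dict.get?_insert, PySem.Dict.get?_empty]
  split_ifs <;> simp_all

theorem opp_inv {t a b : Char} (h1 : pairsD.get? t = some a) (h2 : pairsD.get? a = some b) :
    b = t := by
  rw [pairs_get] at h1 h2
  by_cases hN : t = 'N'
  · subst hN; simp at h1; subst h1; simp at h2; exact h2.symm
  by_cases hS : t = 'S'
  · subst hS; simp at h1; subst h1; simp at h2; exact h2.symm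
  by_cases hE : t = 'E'
  · subst hE; simp at h1; subst h1; simp at h2; exact h2.symm
  by_cases hW : t = 'W'
  · subst hW; simp at h1; subst h1; simp at h2; exact h2.symm
  simp [hN, hS, hE, hW] at h1

theorem opp_of_nsew {t a : Char} (ht : nsew t = true) :
    ((pairsD.get? t).getD '!' = a) ↔ pairsD.get? t = some a := by
  simp [nsew] at ht
  rcases ht with ((h | h) | h) | h <;> subst h <;> rw [pairs_get] <;> simp

-- the stack never holds two adjacent mutually-opposite characters
def GoodF (st : List Char) : Prop :=
  List.IsChain (fun x y => pairsD.get? y ≠ some x) st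

theorem goodF_sstep {st : List Char} (h : GoodF st) (a : Char) : GoodF (sstep st a) := by
  unfold GoodF at *
  cases st with
  | nil => simpa [sstep] using List.isChain_singleton _
  | cons t r =>
    simp only [sstep]
    split
    · exact h.tail
    · next hne =>
      exact List.isChain_cons_cons.mpr ⟨by simpa using hne, h⟩

theorem sstep_cancel {st : List Char} (h : GoodF st) {a b : Char}
    (hab : pairsD.get? a = some b) : sstep (sstep st a) b = st := by
  cases st with
  | nil => simp [sstep, hab]
  | cons t r =>
    by_cases hta : pairsD.get? t = some a
    · have hbt : b = t := opp_inv hta hab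
      subst hbt
      cases r with
      | nil => simp [sstep, hta]
      | cons r0 r' =>
        have hne : pairsD.get? r0 ≠ some b := (List.isChain_cons_cons.mp h).1
        simp [sstep, hta, hne]
    · simp [sstep, hta, hab]

-- one scan pass does not change the final stack
theorem scan_inv (w : List Char) :
    ∀ st, GoodF st → (scanB w).foldl sstep st = w.foldl sstep st := by
  fun_induction scanB w with
  | case1 => intro st _; rfl
  | case2 a => intro st _; rfl
  | case3 a b rest hab ih =>
    intro st hst
    simp only [List.foldl]
    have hab' : pairsD.get? a = some b := by simpa using hab
    rw [ih st hst, sstep_cancel hst hab']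
  | case4 a b rest hab ih =>
    intro st hst
    simp only [List.foldl]
    exact ih _ (goodF_sstep hst a)

theorem reduceB_foldl (s : List Char) :
    (reduceB s).foldl sstep [] = s.foldl sstep [] := by
  fun_induction reduceB s with
  | case1 s h => rfl
  | case2 s h ih =>
    rw [ih]
    exact scan_inv s [] (by simp [GoodF])

-- a word the scan pass leaves unchanged has no adjacent opposite pair
def noAdj (s : List Char) : Prop :=
  List.IsChain (fun x y => pairsD.get? x ≠ some y) s

theorem noAdj_of_scan_len (s : List Char) (h : (scanB s).length = s.length) : noAdj s := by
  fun_induction scanB s with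
  | case1 => exact List.isChain_nil
  | case2 a => exact List.isChain_singleton a
  | case3 a b rest hab ih =>
    exfalso
    have := scanB_length_le rest
    simp at h; omega
  | case4 a b rest hab ih =>
    have h' : (scanB (b :: rest)).length = (b :: rest).length := by simp at h; simpa using h
    exact List.isChain_cons_cons.mpr ⟨by simpa using hab, ih h'⟩

theorem reduceB_noAdj (s : List Char) : noAdj (reduceB s) := by
  fun_induction reduceB s with
  | case1 s h => exact noAdj_of_scan_len s h
  | case2 s h ih => exact ih

-- the stack fixes an irreducible word (up to reversal)
theorem foldl_sstep_of_noAdj :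
    ∀ (r : List Char) (st : List Char), noAdj r →
      (∀ t rs a rr, st = t :: rs → r = a :: rr → pairsD.get? t ≠ some a) →
      r.foldl sstep st = r.reverse ++ st := by
  intro r
  induction r with
  | nil => intro st _ _; simp
  | cons a r' ih =>
    intro st hna hside
    have hst' : sstep st a = a :: st := by
      cases st with
      | nil => rfl
      | cons t rs =>
        have := hside t rs a r' rfl rfl
        simp [sstep, this]
    simp only [List.foldl, hst']
    rw [ih (a :: st) hna.tail ?_]
    · simp
    · intro t rs b rr ht hr
      cases ht
      exact (List.isChain_cons.mp hna).1 b (by simp [hr])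

theorem reduceB_length_eq_frun (s : List Char) :
    (s.foldl sstep []).length = (reduceB s).length := by
  rw [← reduceB_foldl s,
      foldl_sstep_of_noAdj (reduceB s) [] (reduceB_noAdj s) (by intro t rs a rr h; cases h)]
  simp

-- bridge A's rear stack to the front stack, for NSEW content
theorem stepA_eq_sstep {st : List Char} (a : Char) (hst : ∀ c ∈ st, nsew c = true) :
    stepA st.reverse a = (sstep st a).reverse := by
  cases st with
  | nil => simp [stepA, sstep]
  | cons t r =>
    have ht : nsew t = true := hst t (by simp)
    have hlast : PySem.List.pyGet? (t :: r).reverse (-1) = some t := by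
      rw [List.reverse_cons]; exact PySem.List.pyGet?_neg_one_append_singleton _ _
    simp only [stepA, sstep, hlast, Option.getD_some]
    rw [if_neg (by simp)]
    by_cases hc : pairsD.get? t = some a
    · have hg : (pairsD.get? t).getD '!' = a := by simp [hc]
      simp [hc, List.reverse_cons]
    · have hga : (pairsD.get? t).getD '!' ≠ a := fun h => hc ((opp_of_nsew ht).mp h)
      simp [Ne.symm hga, hc, List.reverse_cons]

theorem sstep_mem {st : List Char} {a c : Char} (h : c ∈ sstep st a) : c = a ∨ c ∈ st := by
  cases st with
  | nil => simp [sstep] at h; exact Or.inl h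
  | cons t r =>
    simp only [sstep] at h
    split at h <;> simp_all

theorem foldl_stepA_eq (w : List Char) :
    ∀ st, (∀ c ∈ w, nsew c = true) → (∀ c ∈ st, nsew c = true) →
      w.foldl stepA st.reverse = (w.foldl sstep st).reverse := by
  induction w with
  | nil => intro st _ _; rfl
  | cons a w' ih =>
    intro st hw hst
    have ha : nsew a = true := hw a (by simp)
    simp only [List.foldl]
    rw [stepA_eq_sstep a hst]
    exact ih (sstep st a) (fun c hc => hw c (by simp [hc]))
      (fun c hc => (sstep_mem hc).elim (fun h => h ▸ ha) (hst c))

-- junk (non-NSEW) characters pass through everything untouched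
theorem junk_not_opp {j : Char} (hj : nsew j = false) (a : Char) :
    pairsD.get? a ≠ some j := by
  intro h
  rw [pairs_get] at h
  split_ifs at h
  all_goals simp at h
  all_goals (subst h; simp [nsew] at hj)

theorem scanB_append_junk {j : Char} (hj : nsew j = false) :
    ∀ p : List Char, scanB (p ++ [j]) = scanB p ++ [j] := by
  have hget : ∀ a : Char, pairsD.get? a ≠ some j := junk_not_opp hj
  intro p
  fun_induction scanB p with
  | case1 => rfl
  | case2 a => simp [scanB, hget a]
  | case3 a b rest hab ih => simp only [List.cons_append, scanB, hab, if_true, ih]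
  | case4 a b rest hab ih =>
    simp only [List.cons_append, scanB] at ih ⊢
    rw [if_neg (by simpa using hab), ih]

theorem reduceB_append_junk {j : Char} (hj : nsew j = false) (p : List Char) :
    reduceB (p ++ [j]) = reduceB p ++ [j] := by
  fun_induction reduceB p with
  | case1 p h =>
    rw [reduceB]
    simp [scanB_append_junk hj, h]
  | case2 p h ih =>
    rw [reduceB]
    simp only [scanB_append_junk hj]
    rw [if_neg (by simp; omega)]
    exact ih

theorem stepA_junk {j : Char} (hj : nsew j = false) {st : List Char}
    (hst : ∀ c ∈ st, nsew c = true) : stepA st j = st ++ [j] := by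
  cases st with
  | nil => rfl
  | cons t r =>
    have hlast : PySem.List.pyGet? (t :: r) (-1) = some ((t :: r).getLast (by simp)) := by
      simp [PySem.List.pyGet?_neg_one, List.getLast?_eq_getLast]
    have htl : nsew ((t :: r).getLast (by simp)) = true :=
      hst _ (List.getLast_mem _)
    simp only [stepA, hlast, Option.getD_some]
    rw [if_neg (by simp), if_pos ?_]
    intro h
    exact junk_not_opp hj _ ((opp_of_nsew htl).mp h.symm)

theorem foldl_sstep_mem :
    ∀ (w st : List Char) (c : Char), c ∈ w.foldl sstep st → c ∈ w ∨ c ∈ st := by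
  intro w
  induction w with
  | nil => intro st c hc; exact Or.inr hc
  | cons a w' ih =>
    intro st c hc
    rcases ih (sstep st a) c hc with h | h
    · exact Or.inl (by simp [h])
    · rcases sstep_mem h with h | h
      · exact Or.inl (by simp [h])
      · exact Or.inr h

-- the core equality, for all-NSEW words
theorem main_nsew (w : List Char) (hw : ∀ c ∈ w, nsew c = true) :
    (w.foldl stepA []).length = (reduceB w).length := by
  have h := foldl_stepA_eq w [] hw (by simp)
  simp only [List.reverse_nil] at h
  rw [h, List.length_reverse, reduceB_length_eq_frun]

-- ===== VERDICT (by name: the statement is the Claim_ definition above) =====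
theorem count_loop_length_spec : Claim_equal_count_loop_length := by
  intro line _ hpre
  unfold Spec_count_loop_length count_loop_length count_loop_length_alt
  congr 1
  rcases List.eq_nil_or_concat line.toList with h | ⟨p, j, h⟩
  · rw [h, reduceB]; simp [scanB]
  · rw [List.concat_eq_append] at h
    rw [h]
    have hp : ∀ c ∈ p, nsew c = true := by
      unfold Pre_count_loop_length at hpre
      rw [h, List.dropLast_concat, List.all_eq_true] at hpre
      exact hpre
    by_cases hj : nsew j = true
    · exact main_nsew (p ++ [j]) (by intro c hc; rcases List.mem_append.mp hc with h' | h'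
                                     exacts [hp c h', by simp at h'; exact h' ▸ hj])
    · have hj' : nsew j = false := by simpa using hj
      rw [List.foldl_append, List.foldl_cons, List.foldl_nil]
      have hstack : ∀ c ∈ p.foldl stepA [], nsew c = true := by
        have h := foldl_stepA_eq p [] hp (by simp)
        simp only [List.reverse_nil] at h
        rw [h]
        intro c hc
        rw [List.mem_reverse] at hc
        rcases foldl_sstep_mem p [] c hc with h' | h'
        · exact hp c h'
        · simp at h'
      rw [stepA_junk hj' hstack, reduceB_append_junk hj' p]
      simp only [List.length_append, List.length_singleton]
      rw [main_nsew p hp]
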